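-- pv_equiv track=rewrite | github.com/Yoav-Boehm/intro-to-cs-hw1 | hw2_216342584.py | lychrel_sort
-- ===== SOURCE A (Python) =====
-- def lychrel_loops(n):
--     current_num = n
--     count = 0
--     while True:
--         string_n = str(current_num)[::-1]
--         current_num += int(string_n)
--         count += 1
--         if str(current_num) == str(current_num)[::-1]:
--             return count
--         else:
--             continue
--
-- def is_lychrel_suspect(n, t):
--     pal = n
--     for i in range(t):
--         string_pal = str(pal)[::-1]
--         pal += int(string_pal)
--         if str(pal) == str(pal)[::-1]:
--             return False
--     return True
--
-- def lychrel_sort(numbers, t):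
--     non_t_lychrel = []
--     t_lychrel = []
--     for i in range(len(numbers)):
--         if is_lychrel_suspect(numbers[i], t):
--             non_t_lychrel.append((numbers[i], i))
--         else:
--             t_lychrel.append((numbers[i], lychrel_loops(numbers[i]), i))
--     t_lychrel2 = sorted(t_lychrel, key=lambda num: num[1])
--     non_t_lychrel2 = sorted(non_t_lychrel, key=lambda num: num[1])
--     final_list = [num[0] for num in t_lychrel2]
--     for i in range(len(non_t_lychrel2)):
--         final_list.append(non_t_lychrel2[i][0])
--     return final_list
-- ===== SOURCE B (Python) =====
-- def steps_to_palindrome(n, t):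
--     pal = n
--     for c in range(t):
--         pal += int(str(pal)[::-1])
--         if str(pal) == str(pal)[::-1]:
--             return c + 1
--     return None
--
-- def lychrel_sort(numbers, t):
--     solved = []
--     suspects = []
--     for n in numbers:
--         c = steps_to_palindrome(n, t)
--         if c is None:
--             suspects.append(n)
--         else:
--             solved.append((c, n))
--     return [n for _, n in sorted(solved, key=lambda p: p[0])] + suspects
-- ===== Notes on version B (the rewrite author's own statement) =====
-- stated objective: simpler
-- what changed: Replaces A's two helpers (boolean suspect test plus a second full reverse-and-add pass recomputing the loop count) with one helper returning the step count or None in a single pass per number, drops the index bookkeeping and the redundant second sort of the suspects, and keeps one sort of the solved numbers by loop count.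
import Mathlib
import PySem

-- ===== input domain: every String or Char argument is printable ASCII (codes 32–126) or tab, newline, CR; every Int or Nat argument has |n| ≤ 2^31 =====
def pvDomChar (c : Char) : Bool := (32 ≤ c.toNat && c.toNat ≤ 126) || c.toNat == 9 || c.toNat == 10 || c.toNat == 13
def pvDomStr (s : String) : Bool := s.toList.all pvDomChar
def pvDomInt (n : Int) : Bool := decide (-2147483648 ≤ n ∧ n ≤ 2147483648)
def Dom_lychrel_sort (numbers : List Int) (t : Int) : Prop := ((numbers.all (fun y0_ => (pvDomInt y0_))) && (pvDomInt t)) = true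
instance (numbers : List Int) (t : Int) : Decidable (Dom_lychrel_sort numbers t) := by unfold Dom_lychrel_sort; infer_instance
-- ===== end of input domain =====

-- B replaces A's two helpers (a boolean suspect test followed by a full recomputation of the
-- loop count) by one helper returning Option count, drops the index bookkeeping and the
-- redundant second sort of the suspects (which are already in index order); same return value.

-- ===== PORT A =====
-- shared primitive of the identical Python line 'pal += int(str(pal)[::-1])':
-- str → PySem.Int.toChars, [::-1] is reverse (PySem.Str.slice?_none_none_neg_one),
-- int() → PySem.Int.ofChars?; the .getD 0 default is only reached where Python's int()
-- raises ValueError (reversed string of a negative number) — excluded by Pre_lychrel_sort.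
def pvRevAdd (pal : Int) : Int := pal + ((PySem.Int.ofChars? (PySem.Int.toChars pal).reverse).getD 0)
-- the identical Python test 'str(x) == str(x)[::-1]'
def pvIsPal (x : Int) : Bool := (PySem.Int.toChars x) = (PySem.Int.toChars x).reverse

-- 'while True' loop of lychrel_loops, fuel-bounded: lychrel_sort only calls it on numbers
-- that reach a palindrome within t steps, so fuel t.toNat suffices there (fuel 0 unreachable).
def lychrelLoopsGo : Nat → Int → Int → Int
  | 0, _, count => count
  | f + 1, current_num, count =>
      let current' := pvRevAdd current_num
      let count' := count + 1
      if pvIsPal current' then count' else lychrelLoopsGo f current' count'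

def lychrel_loops (n : Int) (fuel : Nat) : Int := lychrelLoopsGo fuel n 0

-- 'for i in range(t)' of is_lychrel_suspect: t.toNat iterations, early return False
def suspectGo : Nat → Int → Bool
  | 0, _ => true
  | f + 1, pal =>
      let pal' := pvRevAdd pal
      if pvIsPal pal' then false else suspectGo f pal'

def is_lychrel_suspect (n t : Int) : Bool := suspectGo t.toNat n

def lychrel_sort (numbers : List Int) (t : Int) : List Int :=
  let st := (PySem.List.pyRange 0 (PySem.List.len numbers)).foldl
    (fun (acc : List (Int × Int) × List (Int × Int × Int)) i =>
      if is_lychrel_suspect (PySem.List.pyGetD numbers i 0) t then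
        (acc.1 ++ [(PySem.List.pyGetD numbers i 0, i)], acc.2)
      else
        (acc.1, acc.2 ++ [(PySem.List.pyGetD numbers i 0,
                           lychrel_loops (PySem.List.pyGetD numbers i 0) t.toNat, i)]))
    ([], [])
  let t_lychrel2 := PySem.List.sorted st.2 (fun num => num.2.1)
  let non_t_lychrel2 := PySem.List.sorted st.1 (fun num => num.2)
  let final_list := t_lychrel2.map (fun num => num.1)
  (PySem.List.pyRange 0 (PySem.List.len non_t_lychrel2)).foldl
    (fun acc i => acc ++ [(PySem.List.pyGetD non_t_lychrel2 i (0, 0)).1]) final_list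

-- ===== PORT B =====
-- 'for c in range(t)' of steps_to_palindrome, returning Some (c+1) at the first palindrome
def stepsGo : Nat → Int → Int → Option Int
  | 0, _, _ => none
  | f + 1, pal, c =>
      let pal' := pvRevAdd pal
      if pvIsPal pal' then some (c + 1) else stepsGo f pal' (c + 1)

def steps_to_palindrome (n t : Int) : Option Int := stepsGo t.toNat n 0

def lychrel_sort_alt (numbers : List Int) (t : Int) : List Int :=
  let st := numbers.foldl
    (fun (acc : List (Int × Int) × List Int) n =>
      match steps_to_palindrome n t with
      | none => (acc.1, acc.2 ++ [n])
      | some c => (acc.1 ++ [(c, n)], acc.2)) ([], [])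
  (PySem.List.sorted st.1 (fun p => p.1)).map (fun p => p.2) ++ st.2

-- ===== PRECONDITION & SPEC =====
-- Pre_ excludes exactly the inputs where Python A raises: with t ≥ 1 a negative number makes
-- int(str(pal)[::-1]) raise ValueError ('21-'); with t ≤ 0 no step is taken and nothing raises.
def Pre_lychrel_sort (numbers : List Int) (t : Int) : Prop :=
  t ≤ 0 ∨ ∀ n ∈ numbers, 0 ≤ n
instance (numbers : List Int) (t : Int) : Decidable (Pre_lychrel_sort numbers t) := by
  unfold Pre_lychrel_sort; infer_instance

def pvWitness_lychrel_sort : List Int × Int := ([56, 10, 196], 3)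

def Spec_lychrel_sort (numbers : List Int) (t : Int) (out : List Int) : Prop := out = lychrel_sort_alt numbers t
instance (numbers : List Int) (t : Int) (out : List Int) : Decidable (Spec_lychrel_sort numbers t out) := by unfold Spec_lychrel_sort; infer_instance

-- ===== CLAIM (what is proved, stated in full; the proofs are below) =====
def Claim_equal_lychrel_sort : Prop := ∀ (numbers : List Int) (t : Int), Dom_lychrel_sort numbers t → Pre_lychrel_sort numbers t → Spec_lychrel_sort numbers t (lychrel_sort numbers t)

-- ===== LEMMAS AND PROOFS =====

-- A's suspect test answers whether B's step counter finds no palindrome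
theorem suspectGo_eq_isNone : ∀ (f : Nat) (pal c : Int),
    suspectGo f pal = (stepsGo f pal c).isNone := by
  intro f
  induction f with
  | zero => intro pal c; rfl
  | succ f ih =>
      intro pal c
      simp only [suspectGo, stepsGo]
      by_cases h : pvIsPal (pvRevAdd pal) = true
      · simp [h]
      · simp [h]; exact ih _ _

-- when B's counter returns, A's lychrel_loops (same fuel, same running count) returns the same
theorem lychrelLoopsGo_eq_of_stepsGo : ∀ (f : Nat) (pal c k : Int),
    stepsGo f pal c = some k → lychrelLoopsGo f pal c = k := by
  intro f
  induction f with
  | zero => intro pal c k h; simp [stepsGo] at h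
  | succ f ih =>
      intro pal c k h
      simp only [stepsGo] at h
      simp only [lychrelLoopsGo]
      by_cases hp : pvIsPal (pvRevAdd pal) = true
      · simp [hp] at h ⊢; omega
      · simp [hp] at h ⊢; exact ih _ _ _ h

-- A's routing loop characterised: two filtered-and-mapped sublists appended to the accumulators
theorem foldA_route (t : Int) : ∀ (l : List (Int × Int)) (b : List (Int × Int)) (s : List (Int × Int × Int)),
    l.foldl
      (fun (acc : List (Int × Int) × List (Int × Int × Int)) p =>
        if is_lychrel_suspect p.2 t then (acc.1 ++ [(p.2, p.1)], acc.2)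
        else (acc.1, acc.2 ++ [(p.2, lychrel_loops p.2 t.toNat, p.1)])) (b, s)
    = (b ++ (l.filter (fun p => is_lychrel_suspect p.2 t)).map (fun p => (p.2, p.1)),
       s ++ (l.filter (fun p => ! is_lychrel_suspect p.2 t)).map
              (fun p => (p.2, lychrel_loops p.2 t.toNat, p.1))) := by
  intro l
  induction l with
  | nil => intro b s; simp
  | cons p l ih =>
      intro b s
      by_cases h : is_lychrel_suspect p.2 t = true
      · simp [List.foldl_cons, h, ih]
      · simp [List.foldl_cons, h, ih]

-- B's routing loop characterised the same way
theorem foldB_route (t : Int) : ∀ (l : List Int) (b : List (Int × Int)) (s : List Int),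
    l.foldl
      (fun (acc : List (Int × Int) × List Int) n =>
        match steps_to_palindrome n t with
        | none => (acc.1, acc.2 ++ [n])
        | some c => (acc.1 ++ [(c, n)], acc.2)) (b, s)
    = (b ++ l.filterMap (fun n => (steps_to_palindrome n t).map (fun c => (c, n))),
       s ++ l.filter (fun n => (steps_to_palindrome n t).isNone)) := by
  intro l
  induction l with
  | nil => intro b s; simp
  | cons n l ih =>
      intro b s
      cases h : steps_to_palindrome n t with
      | none => simp [List.foldl_cons, h, ih]
      | some c => simp [List.foldl_cons, h, ih]

-- insertBy commutes with a key-preserving map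
theorem insertBy_map {α β : Type} (f : α → β) (r : α → α → Bool) (r' : β → β → Bool)
    (h : ∀ a b, r' (f a) (f b) = r a b) (x : α) :
    ∀ (l : List α), (PySem.List.insertBy r x l).map f = PySem.List.insertBy r' (f x) (l.map f) := by
  intro l
  induction l with
  | nil => simp [PySem.List.insertBy]
  | cons y ys ih =>
      simp only [PySem.List.insertBy, List.map_cons, h]
      by_cases hb : r x y = true
      · simp [hb]
      · simp [hb, ih]

-- PySem's stable sort commutes with a key-preserving map
theorem sorted_map {α β κ : Type} [LinearOrder κ] (f : α → β) (kα : α → κ) (kβ : β → κ)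
    (h : ∀ a, kβ (f a) = kα a) (l : List α) :
    (PySem.List.sorted l kα).map f = PySem.List.sorted (l.map f) kβ := by
  rw [PySem.List.sorted_eq_foldl_insertBy, PySem.List.sorted_eq_foldl_insertBy]
  have main : ∀ (l : List α) (acc : List α),
      (l.foldl (fun acc x => PySem.List.insertBy (fun a b => decide (kα a < kα b)) x acc) acc).map f
      = (l.map f).foldl (fun acc x => PySem.List.insertBy (fun a b => decide (kβ a < kβ b)) x acc) (acc.map f) := by
    intro l
    induction l with
    | nil => intro acc; simp
    | cons x xs ih =>
        intro acc
        simp only [List.foldl_cons, List.map_cons, ih]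
        rw [insertBy_map f (fun a b => decide (kα a < kα b)) (fun a b => decide (kβ a < kβ b)) (by intro a b; show decide (kβ (f a) < kβ (f b)) = decide (kα a < kα b); rw [h, h])]
  simpa using main l []

-- per-element link between A's (suspect?, loops) pair and B's Option counter, lifted to lists
theorem lists_rel (t : Int) : ∀ (E : List (Int × Int)),
    E.filterMap (fun p => (steps_to_palindrome p.2 t).map (fun c => (c, p.2)))
    = ((E.filter (fun p => ! is_lychrel_suspect p.2 t)).map
        (fun p => (p.2, lychrel_loops p.2 t.toNat, p.1))).map (fun q => (q.2.1, q.1)) := by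
  intro E
  induction E with
  | nil => simp
  | cons p E ih =>
      have hs : is_lychrel_suspect p.2 t = (stepsGo t.toNat p.2 0).isNone :=
        suspectGo_eq_isNone t.toNat p.2 0
      cases h : steps_to_palindrome p.2 t with
      | none =>
          have : is_lychrel_suspect p.2 t = true := by
            rw [hs]; simpa [steps_to_palindrome] using h
          simp [h, this, ih]
      | some c =>
          have h' : stepsGo t.toNat p.2 0 = some c := by simpa [steps_to_palindrome] using h
          have hns : is_lychrel_suspect p.2 t = false := by rw [hs, h']; rfl
          have hl : lychrel_loops p.2 t.toNat = c := by
            unfold lychrel_loops; exact lychrelLoopsGo_eq_of_stepsGo _ _ _ _ h'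
          simp [h, hns, hl, ih]

-- B's two result lists, re-expressed over A's enumerate-filter view of the input
theorem altB_solved (numbers : List Int) (t : Int) :
    numbers.filterMap (fun n => (steps_to_palindrome n t).map (fun c => (c, n)))
    = (((PySem.List.enumerate numbers 0).filter (fun p => ! is_lychrel_suspect p.2 t)).map
        (fun p => (p.2, lychrel_loops p.2 t.toNat, p.1))).map (fun q => (q.2.1, q.1)) := by
  conv_lhs => rw [← PySem.List.map_snd_enumerate numbers 0]
  rw [List.filterMap_map]
  simp only [Function.comp_def]
  exact lists_rel t _

theorem altB_suspects (numbers : List Int) (t : Int) :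
    numbers.filter (fun n => (steps_to_palindrome n t).isNone)
    = ((PySem.List.enumerate numbers 0).filter (fun p => is_lychrel_suspect p.2 t)).map
        (fun p => p.2) := by
  conv_lhs => rw [← PySem.List.map_snd_enumerate numbers 0]
  rw [List.filter_map]
  congr 1
  apply List.filter_congr
  intro p _
  simp only [Function.comp_def, steps_to_palindrome, is_lychrel_suspect]
  exact (suspectGo_eq_isNone t.toNat p.2 0).symm

-- A's suspect list comes out of its (stable) sort unchanged: its indices strictly increase
theorem sorted_suspects_id (numbers : List Int) (t : Int) :
    PySem.List.sorted
      (((PySem.List.enumerate numbers 0).filter (fun p => is_lychrel_suspect p.2 t)).map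
        (fun p => (p.2, p.1))) (fun num => num.2)
    = ((PySem.List.enumerate numbers 0).filter (fun p => is_lychrel_suspect p.2 t)).map
        (fun p => (p.2, p.1)) := by
  apply PySem.List.sorted_eq_of_perm_of_pairwise_lt _ _ _ (List.Perm.refl _)
  rw [List.pairwise_map]
  exact ((PySem.List.pairwise_lt_enumerate numbers 0).filter _)

theorem lychrel_sort_eq_alt (numbers : List Int) (t : Int) :
    lychrel_sort numbers t = lychrel_sort_alt numbers t := by
  unfold lychrel_sort lychrel_sort_alt
  -- rewrite A's index loop as a loop over enumerate numbers
  rw [show (PySem.List.pyRange 0 (PySem.List.len numbers)) =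
        (PySem.List.enumerate numbers).map (fun p => p.1) by
      rw [PySem.List.enumerate_eq_map_pyRange numbers 0]
      simp [Function.comp_def],
    List.foldl_map]
  simp only []
  have hget : ∀ p ∈ PySem.List.enumerate numbers 0, PySem.List.pyGetD numbers p.1 0 = p.2 := by
    intro p hp
    rcases (PySem.List.mem_enumerate_iff _ _ _).1 hp with ⟨k, hk, rfl⟩
    simp [PySem.List.pyGetD_natCast, hk]
  rw [PySem.List.foldl_congr_mem (PySem.List.enumerate numbers 0) _
        (fun (acc : List (Int × Int) × List (Int × Int × Int)) p =>
          if is_lychrel_suspect p.2 t then (acc.1 ++ [(p.2, p.1)], acc.2)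
          else (acc.1, acc.2 ++ [(p.2, lychrel_loops p.2 t.toNat, p.1)])) ([], [])
        (by intro acc p hp; simp only [hget p hp]),
      foldA_route t, foldB_route t, altB_solved, altB_suspects]
  simp only [List.nil_append, sorted_suspects_id, PySem.List.len]
  rw [PySem.List.foldl_pyRange_zero_pyGetD' _ ((0 : Int), (0 : Int))
        (fun (acc : List Int) (p : Int × Int) => acc ++ [p.1]),
      PySem.List.foldl_append_singleton_eq_map,
      ← sorted_map (fun (q : Int × Int × Int) => (q.2.1, q.1))
          (fun q => q.2.1) (fun p => p.1) (fun a => rfl)]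
  simp [List.map_map, Function.comp_def]

-- ===== VERDICT (by name: the statement is the Claim_ definition above) =====
theorem lychrel_sort_spec : Claim_equal_lychrel_sort := by
  intro numbers t _ _
  unfold Spec_lychrel_sort
  exact lychrel_sort_eq_alt numbers t
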